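-- pv_equiv track=rewrite | github.com/harjassand/AGI-Stack-Unchained | tools/polymath/polymath_void_to_goals_v1.py | _normalize_topic_id
-- ===== SOURCE A (Python) =====
-- def _normalize_topic_id(raw: str) -> str:
--     out: list[str] = []
--     prev_sep = False
--     for ch in str(raw).strip().lower():
--         if ch.isalnum():
--             out.append(ch)
--             prev_sep = False
--             continue
--         if not prev_sep:
--             out.append("_")
--             prev_sep = True
--     slug = "".join(out).strip("_")
--     return slug or "topic_unknown"
-- ===== SOURCE B (Python) =====
-- from itertools import groupby
--
--
-- def _normalize_topic_id(raw: str) -> str: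
--     s = str(raw).strip().lower()
--     tokens = ("".join(g) for k, g in groupby(s, key=str.isalnum) if k)
--     return "_".join(tokens) or "topic_unknown"
-- ===== Notes on version B (the rewrite author's own statement) =====
-- stated objective: idiomatic
-- what changed: Replaces the manual character loop with prev_sep state plus a final strip('_') by an itertools.groupby tokenize-then-'_'.join assembly, which needs no separator state and no stripping.
import Mathlib
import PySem

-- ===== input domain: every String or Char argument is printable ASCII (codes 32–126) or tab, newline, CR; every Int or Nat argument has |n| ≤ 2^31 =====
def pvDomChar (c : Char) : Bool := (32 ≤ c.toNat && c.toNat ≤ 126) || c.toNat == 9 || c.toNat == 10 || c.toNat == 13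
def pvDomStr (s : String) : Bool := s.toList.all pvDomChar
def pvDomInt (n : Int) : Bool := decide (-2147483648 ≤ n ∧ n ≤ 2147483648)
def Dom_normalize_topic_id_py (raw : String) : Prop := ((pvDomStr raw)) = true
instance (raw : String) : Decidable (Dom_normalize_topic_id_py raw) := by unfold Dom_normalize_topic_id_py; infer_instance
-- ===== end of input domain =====

-- B replaces A's character loop with prev_sep state plus a final strip('_')
-- by a groupby-style tokenize-then-join-with-'_' assembly (idiomatic; same cost).

-- ===== PORT A =====
-- literal port of A: one pass with an out buffer and a prev_sep flag, then .strip("_")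
def normalize_topic_id_py (raw : String) : String :=
  let s := PySem.Chars.lower (PySem.Chars.strip raw.toList)
  let st := s.foldl
    (fun (acc : List Char × Bool) ch =>
      if PySem.Chars.isalnum ch then (acc.1 ++ [ch], false)
      else if !acc.2 then (acc.1 ++ ['_'], true)
      else acc)
    ([], false)
  let slug := PySem.Chars.stripChars st.1 ['_']
  if slug = [] then "topic_unknown" else String.ofList slug

-- ===== PORT B =====
-- groupby(s, key=isalnum): the maximal alnum runs, in order (the key-False groups are dropped)
def pvAlnumRuns : List Char → List (List Char)
  | [] => []
  | c :: cs =>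
    if PySem.Chars.isalnum c then
      (c :: cs.takeWhile PySem.Chars.isalnum) :: pvAlnumRuns (cs.dropWhile PySem.Chars.isalnum)
    else pvAlnumRuns cs
termination_by cs => cs.length
decreasing_by
  · exact Nat.lt_succ_of_le (List.length_dropWhile_le _ _)
  · exact Nat.lt_succ_self _

def normalize_topic_id_py_alt (raw : String) : String :=
  let s := PySem.Chars.lower (PySem.Chars.strip raw.toList)
  let slug := PySem.Chars.join ['_'] (pvAlnumRuns s)
  if slug = [] then "topic_unknown" else String.ofList slug

-- ===== PRECONDITION & SPEC =====
def Spec_normalize_topic_id_py (raw : String) (out : String) : Prop := out = normalize_topic_id_py_alt raw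
instance (raw : String) (out : String) : Decidable (Spec_normalize_topic_id_py raw out) := by unfold Spec_normalize_topic_id_py; infer_instance

-- ===== CLAIM (what is proved, stated in full; the proofs are below) =====
def Claim_equal_normalize_topic_id_py : Prop := ∀ (raw : String), Dom_normalize_topic_id_py raw → Spec_normalize_topic_id_py raw (normalize_topic_id_py raw)

-- ===== LEMMAS AND PROOFS =====

theorem pvAlnumRuns_nil : pvAlnumRuns [] = [] := by rw [pvAlnumRuns.eq_def]

theorem pvAlnumRuns_cons (c : Char) (cs : List Char) :
    pvAlnumRuns (c :: cs) =
      if PySem.Chars.isalnum c then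
        (c :: cs.takeWhile PySem.Chars.isalnum) :: pvAlnumRuns (cs.dropWhile PySem.Chars.isalnum)
      else pvAlnumRuns cs := by
  rw [pvAlnumRuns.eq_def]

-- recursive form of A's loop body, starting from flag `prev`
def bodyA : List Char → Bool → List Char
  | [], _ => []
  | c :: cs, prev =>
    if PySem.Chars.isalnum c then c :: bodyA cs false
    else if prev then bodyA cs true
    else '_' :: bodyA cs true

theorem foldA_eq_bodyA (cs : List Char) (out : List Char) (prev : Bool) :
    (cs.foldl (fun (acc : List Char × Bool) ch =>
        if PySem.Chars.isalnum ch then (acc.1 ++ [ch], false)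
        else if !acc.2 then (acc.1 ++ ['_'], true)
        else acc) (out, prev)).1 = out ++ bodyA cs prev := by
  induction cs generalizing out prev with
  | nil => simp [bodyA]
  | cons c cs ih =>
    rw [List.foldl_cons]
    show (List.foldl _ (if PySem.Chars.isalnum c then (out ++ [c], false)
        else if !prev then (out ++ ['_'], true) else (out, prev)) cs).1 = _
    by_cases h : PySem.Chars.isalnum c
    · rw [if_pos h, ih]; simp [bodyA, h]
    · rw [if_neg h]
      cases prev
      · rw [if_pos (show (!false) = true from rfl), ih]; simp [bodyA, h]
      · rw [if_neg (show ¬((!true) = true) by decide), ih]; simp [bodyA, h]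

theorem alnum_ne_underscore {c : Char} (h : PySem.Chars.isalnum c = true) : c ≠ '_' := by
  intro hc; rw [hc] at h; exact absurd h (by decide)

-- bodyA with prev = true never starts with '_'
theorem dropWhile_bodyA_true (p : Char → Bool) (hp : ∀ c, PySem.Chars.isalnum c = true → p c = false)
    (cs : List Char) : List.dropWhile p (bodyA cs true) = bodyA cs true := by
  induction cs with
  | nil => simp [bodyA]
  | cons c cs ih =>
    by_cases h : PySem.Chars.isalnum c
    · simp [bodyA, h, hp c h]
    · simpa [bodyA, h] using ih

theorem dropWhile_bodyA_false (p : Char → Bool) (hp : ∀ c, PySem.Chars.isalnum c = true → p c = false)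
    (hu : p '_' = true) (cs : List Char) :
    List.dropWhile p (bodyA cs false) = bodyA cs true := by
  cases cs with
  | nil => rfl
  | cons c cs =>
    by_cases h : PySem.Chars.isalnum c
    · simp [bodyA, h, hp c h]
    · simp [bodyA, h, hu, dropWhile_bodyA_true p hp cs]

-- "rstrip" of w ++ u is w ++ rstrip u when no element of w matches p
theorem rstrip_append (p : Char → Bool) (w u : List Char) (hw : ∀ x ∈ w, p x = false) :
    (List.dropWhile p (w ++ u).reverse).reverse = w ++ (List.dropWhile p u.reverse).reverse := by
  rw [List.reverse_append, List.dropWhile_append]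
  by_cases hu : (List.dropWhile p u.reverse).isEmpty = true
  · rw [if_pos hu]
    rw [List.isEmpty_iff] at hu
    rw [hu, List.reverse_nil, List.append_nil,
      List.dropWhile_eq_self_iff.mpr, List.reverse_reverse]
    intro h
    have hlen : w.length - 1 < w.length := by
      rw [List.length_reverse] at h; omega
    simp [hw _ (List.getElem_mem hlen)]
  · rw [if_neg hu, List.reverse_append, List.reverse_reverse]

theorem bodyA_alnum_prefix (t u : List Char) (ht : ∀ x ∈ t, PySem.Chars.isalnum x = true) :
    bodyA (t ++ u) false = t ++ bodyA u false := by
  induction t with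
  | nil => rfl
  | cons c t ih =>
    simp only [List.cons_append, bodyA, ht c (by simp)]
    simp only [ih (fun x hx => ht x (by simp [hx])), if_true]

-- every run produced by pvAlnumRuns is nonempty
theorem pvAlnumRuns_ne_nil (cs : List Char) : ∀ x ∈ pvAlnumRuns cs, x ≠ [] := by
  fun_induction pvAlnumRuns cs with
  | case1 => simp
  | case2 c cs h ih =>
    intro x hx
    rcases List.mem_cons.mp hx with hx1 | hx1
    · subst hx1; simp
    · exact ih x hx1
  | case3 c cs h ih => exact ih

theorem join_cons (x : List Char) (xs : List (List Char)) :
    PySem.Chars.join ['_'] (x :: xs) =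
      x ++ (if xs = [] then [] else '_' :: PySem.Chars.join ['_'] xs) := by
  cases xs with
  | nil => simp [PySem.Chars.join, List.intercalate]
  | cons y ys => simp [PySem.Chars.join, List.intercalate, List.intersperse]

theorem join_eq_nil_iff (cs : List Char) :
    (PySem.Chars.join ['_'] (pvAlnumRuns cs) = []) ↔ pvAlnumRuns cs = [] := by
  constructor
  · intro h
    cases hx : pvAlnumRuns cs with
    | nil => rfl
    | cons x xs =>
      rw [hx, join_cons] at h
      have hne := pvAlnumRuns_ne_nil cs x (by rw [hx]; simp)
      rcases List.append_eq_nil_iff.mp h with ⟨h1, _⟩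
      exact absurd h1 hne
  · intro h; rw [h]; rfl

-- the crux: rstripping underscores from bodyA · true yields the '_'-joined runs
theorem rstrip_bodyA_true (p : Char → Bool) (hp : ∀ c, PySem.Chars.isalnum c = true → p c = false)
    (hu : p '_' = true) (cs : List Char) :
    (List.dropWhile p (bodyA cs true).reverse).reverse =
      PySem.Chars.join ['_'] (pvAlnumRuns cs) := by
  fun_induction pvAlnumRuns cs with
  | case1 => simp [bodyA, PySem.Chars.join, List.intercalate]
  | case2 c cs h ih =>
    rw [join_cons]
    have hsplit : cs = cs.takeWhile PySem.Chars.isalnum ++ cs.dropWhile PySem.Chars.isalnum :=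
      (List.takeWhile_append_dropWhile).symm
    have hbt : bodyA (c :: cs) true = (c :: cs.takeWhile PySem.Chars.isalnum) ++
        bodyA (cs.dropWhile PySem.Chars.isalnum) false := by
      conv_lhs => rw [hsplit]
      simp only [bodyA, h, if_true, List.cons_append]
      rw [bodyA_alnum_prefix _ _ (fun x hx => List.mem_takeWhile_imp hx)]
    rw [hbt, rstrip_append p _ _ (by
      intro x hx
      rcases List.mem_cons.mp hx with h1 | h1
      · subst h1; exact hp _ h
      · exact hp _ (List.mem_takeWhile_imp h1))]
    congr 1
    cases hd : cs.dropWhile PySem.Chars.isalnum with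
    | nil =>
      simp only [bodyA, List.reverse_nil, List.dropWhile_nil]
      rw [pvAlnumRuns_nil, if_pos rfl]
    | cons d ds =>
      have hdna : PySem.Chars.isalnum d = false := by
        have h1 := List.head_dropWhile_not PySem.Chars.isalnum (l := cs) (by rw [hd]; simp)
        simpa [hd] using h1
      have hbf : bodyA (d :: ds) false = '_' :: bodyA ds true := by
        simp [bodyA, hdna]
      have hruns : pvAlnumRuns (d :: ds) = pvAlnumRuns ds := by
        rw [pvAlnumRuns_cons, if_neg (by simp [hdna])]
      rw [hbf, hruns]
      have ih' : (List.dropWhile p (bodyA ds true).reverse).reverse =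
          PySem.Chars.join ['_'] (pvAlnumRuns ds) := by
        rw [hd, pvAlnumRuns_cons, if_neg (by simp [hdna]),
          show bodyA (d :: ds) true = bodyA ds true from by simp [bodyA, hdna]] at ih
        exact ih
      rw [List.reverse_cons, List.dropWhile_append]
      by_cases he : (List.dropWhile p (bodyA ds true).reverse).isEmpty = true
      · rw [if_pos he]
        rw [List.isEmpty_iff] at he
        have : pvAlnumRuns ds = [] := by
          rw [← join_eq_nil_iff, ← ih', he, List.reverse_nil]
        rw [if_pos this]
        simp [hu]
      · rw [if_neg he]
        have : pvAlnumRuns ds ≠ [] := by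
          intro hc
          have hj : (List.dropWhile p (bodyA ds true).reverse).reverse = [] := by
            rw [ih', hc]; rfl
          rw [List.isEmpty_iff] at he
          exact he (by simpa using congrArg List.reverse hj)
        rw [if_neg this, List.reverse_append, ih']
        simp
  | case3 c cs h ih =>
    have hb : bodyA (c :: cs) true = bodyA cs true := by simp [bodyA, h]
    rw [hb]
    exact ih

theorem main_eq (cs : List Char) :
    PySem.Chars.stripChars (bodyA cs false) ['_'] =
      PySem.Chars.join ['_'] (pvAlnumRuns cs) := by
  have hp : ∀ c, PySem.Chars.isalnum c = true → (['_'].contains c) = false := by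
    intro c hc
    simpa using alnum_ne_underscore hc
  have hu : (['_'].contains '_') = true := by decide
  unfold PySem.Chars.stripChars
  show (List.dropWhile (fun c => ['_'].contains c)
      (List.dropWhile (fun c => ['_'].contains c) (bodyA cs false)).reverse).reverse = _
  rw [dropWhile_bodyA_false (fun c => ['_'].contains c) hp hu,
    rstrip_bodyA_true (fun c => ['_'].contains c) hp hu]

-- ===== VERDICT (by name: the statement is the Claim_ definition above) =====
theorem normalize_topic_id_py_spec : Claim_equal_normalize_topic_id_py := by
  intro raw _
  unfold Spec_normalize_topic_id_py normalize_topic_id_py normalize_topic_id_py_alt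
  simp only [foldA_eq_bodyA _ [] false, List.nil_append, main_eq]
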